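-- pv_equiv track=rewrite | github.com/vandanamv/DodgeChat | dodgechat/questions.py | shortest_path_between
-- ===== SOURCE A (Python) =====
-- from typing import Any, Dict, List, Optional, Sequence, Tuple
--
-- def shortest_path_between(adjacency: Dict[str, List[str]], start_id: str, goal_id: str, max_depth: int = 6) -> List[str]:
--     if not start_id or not goal_id:
--         return []
--     if start_id == goal_id:
--         return [start_id]
--
--     queue: List[Tuple[str, List[str], int]] = [(start_id, [start_id], 0)]
--     seen = {start_id}
--     while queue:
--         current_id, path, depth = queue.pop(0)
--         if depth >= max_depth:
--             continue
--         for neighbor_id in adjacency.get(current_id, []):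
--             if neighbor_id in seen:
--                 continue
--             next_path = path + [neighbor_id]
--             if neighbor_id == goal_id:
--                 return next_path
--             seen.add(neighbor_id)
--             queue.append((neighbor_id, next_path, depth + 1))
--     return []
-- ===== SOURCE B (Python) =====
-- def shortest_path_between(adjacency, start_id, goal_id, max_depth=6):
--     if not start_id or not goal_id:
--         return []
--     if start_id == goal_id:
--         return [start_id]
--
--     parent = {start_id: start_id}
--     frontier = [start_id]
--     depth = 0
--     while frontier and depth < max_depth:
--         next_frontier = []
--         for node in frontier:
--             for nb in adjacency.get(node, []):
--                 if nb in parent: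
--                     continue
--                 parent[nb] = node
--                 if nb == goal_id:
--                     path = [nb]
--                     while path[0] != start_id:
--                         path.insert(0, parent[path[0]])
--                     return path
--                 next_frontier.append(nb)
--         frontier = next_frontier
--         depth += 1
--     return []
-- ===== Notes on version B (the rewrite author's own statement) =====
-- stated objective: alternative
-- what changed: Replaces A's list.pop(0) FIFO queue carrying a full path copy in every entry with level-synchronous BFS: expand one whole depth layer at a time over a parent-pointer dict and rebuild the path by prepending parents only when the goal is found.
import Mathlib
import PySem

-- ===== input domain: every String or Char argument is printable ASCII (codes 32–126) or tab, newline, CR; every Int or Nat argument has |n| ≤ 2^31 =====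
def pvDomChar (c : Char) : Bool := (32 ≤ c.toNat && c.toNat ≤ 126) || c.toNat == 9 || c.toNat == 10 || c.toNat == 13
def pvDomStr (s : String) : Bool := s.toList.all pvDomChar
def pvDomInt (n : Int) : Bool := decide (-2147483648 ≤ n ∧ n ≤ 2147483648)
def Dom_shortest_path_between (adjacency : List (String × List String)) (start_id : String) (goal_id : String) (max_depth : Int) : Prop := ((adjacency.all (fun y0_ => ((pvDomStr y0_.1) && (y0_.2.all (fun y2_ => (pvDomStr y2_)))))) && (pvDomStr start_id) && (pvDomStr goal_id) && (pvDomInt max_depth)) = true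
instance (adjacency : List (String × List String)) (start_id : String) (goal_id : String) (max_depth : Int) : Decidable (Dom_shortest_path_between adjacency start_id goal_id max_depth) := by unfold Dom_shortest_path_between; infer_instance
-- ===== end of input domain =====

-- B replaces A's FIFO queue of full path copies (list.pop(0)) with level-synchronous BFS:
-- expand one whole depth layer at a time over a parent-pointer dict and rebuild the path
-- by prepending parents only at the goal (objective: alternative; return value proved identical).

-- shared helper: `adjacency.get(k, [])` — first-match association-list lookup (both Pythons do this same dict lookup)
def pvAdjGet (adjacency : List (String × List String)) (k : String) : List String :=
  (PySem.Dict.mk adjacency).getD k []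

-- outer-loop totality fuel for A's port: strictly more than the number of possible queue pops
-- (each pop was an enqueue; enqueues ≤ 1 + total number of neighbour entries)
def pvFuel (adjacency : List (String × List String)) : Nat :=
  adjacency.foldl (fun a kv => a + kv.2.length) 0 + 2

-- ===== PORT A =====
-- inner `for neighbor_id in adjacency.get(...)` loop of A; .inl = early return, .inr = updated (queue, seen)
def pvInnerA (goal : String) (path : List String) (depth : Int) :
    List String → List (String × List String × Int) → PySem.Set String →
    (List String) ⊕ (List (String × List String × Int) × PySem.Set String)
  | [], queue, seen => .inr (queue, seen)
  | nb :: nbs, queue, seen =>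
    if PySem.Set.contains seen nb then pvInnerA goal path depth nbs queue seen
    else if nb = goal then .inl (path ++ [nb])
    else pvInnerA goal path depth nbs (queue ++ [(nb, path ++ [nb], depth + 1)]) (PySem.Set.add seen nb)

-- A's `while queue:` loop; fuel is a totality guard only (never reached on real runs)
def pvLoopA (adjacency : List (String × List String)) (goal : String) (max_depth : Int) :
    Nat → List (String × List String × Int) → PySem.Set String → List String
  | 0, _, _ => []
  | _ + 1, [], _ => []
  | f + 1, (cur, path, depth) :: rest, seen =>
    if max_depth ≤ depth then pvLoopA adjacency goal max_depth f rest seen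
    else match pvInnerA goal path depth (pvAdjGet adjacency cur) rest seen with
      | .inl res => res
      | .inr (q', s') => pvLoopA adjacency goal max_depth f q' s'

def shortest_path_between (adjacency : List (String × List String)) (start_id : String) (goal_id : String) (max_depth : Int) : List String :=
  if start_id = "" ∨ goal_id = "" then []
  else if start_id = goal_id then [start_id]
  else pvLoopA adjacency goal_id max_depth (pvFuel adjacency)
        [(start_id, [start_id], (0 : Int))] (PySem.Set.ofList [start_id])

-- ===== PORT B =====
-- B's `while path[0] != start_id: path.insert(0, parent[path[0]])`; the fuel (the dict size,
-- an upper bound on any parent chain) and the `getD h h` default are totality guards only: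
-- every looked-up key is present in `parent` on real runs
def pvBuild (start : String) : Nat → PySem.Dict String String → List String → List String
  | 0, _, path => path
  | f + 1, parent, path =>
    match path with
    | [] => []
    | h :: _ => if h = start then path else pvBuild start f parent (parent.getD h h :: path)

-- B's inner `for nb in adjacency.get(node, [])`; .inl = early return, .inr = (next_frontier, parent)
def pvNbrs (goal start node : String) :
    List String → List String → PySem.Dict String String →
    (List String) ⊕ (List String × PySem.Dict String String)
  | [], nxt, parent => .inr (nxt, parent)
  | nb :: nbs, nxt, parent =>
    if parent.contains nb then pvNbrs goal start node nbs nxt parent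
    else
      let parent' := parent.insert nb node
      if nb = goal then .inl (pvBuild start parent'.size parent' [nb])
      else pvNbrs goal start node nbs (nxt ++ [nb]) parent'

-- B's `for node in frontier` pass building one whole next depth layer
def pvLevel (adjacency : List (String × List String)) (goal start : String) :
    List String → List String → PySem.Dict String String →
    (List String) ⊕ (List String × PySem.Dict String String)
  | [], nxt, parent => .inr (nxt, parent)
  | node :: rest, nxt, parent =>
    match pvNbrs goal start node (pvAdjGet adjacency node) nxt parent with
    | .inl res => .inl res
    | .inr (nxt', parent') => pvLevel adjacency goal start rest nxt' parent'

-- B's `while frontier and depth < max_depth`: the Nat fuel counts the remaining levels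
-- (max_depth - depth), so it is exactly the loop bound, not a guard
def pvLevels (adjacency : List (String × List String)) (goal start : String) :
    Nat → List String → PySem.Dict String String → List String
  | 0, _, _ => []
  | _ + 1, [], _ => []
  | f + 1, frontier, parent =>
    match pvLevel adjacency goal start frontier [] parent with
    | .inl res => res
    | .inr (nxt, parent') => pvLevels adjacency goal start f nxt parent'

def shortest_path_between_alt (adjacency : List (String × List String)) (start_id : String) (goal_id : String) (max_depth : Int) : List String :=
  if start_id = "" ∨ goal_id = "" then []
  else if start_id = goal_id then [start_id]
  else pvLevels adjacency goal_id start_id max_depth.toNat [start_id]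
        ((PySem.Dict.empty).insert start_id start_id)

-- ===== PRECONDITION & SPEC =====
def Spec_shortest_path_between (adjacency : List (String × List String)) (start_id : String) (goal_id : String) (max_depth : Int) (out : List String) : Prop := out = shortest_path_between_alt adjacency start_id goal_id max_depth
instance (adjacency : List (String × List String)) (start_id : String) (goal_id : String) (max_depth : Int) (out : List String) : Decidable (Spec_shortest_path_between adjacency start_id goal_id max_depth out) := by unfold Spec_shortest_path_between; infer_instance

-- ===== CLAIM (what is proved, stated in full; the proofs are below) =====
def Claim_equal_shortest_path_between : Prop := ∀ (adjacency : List (String × List String)) (start_id : String) (goal_id : String) (max_depth : Int), Dom_shortest_path_between adjacency start_id goal_id max_depth → Spec_shortest_path_between adjacency start_id goal_id max_depth (shortest_path_between adjacency start_id goal_id max_depth)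

-- ===== LEMMAS AND PROOFS =====

-- all strings occurring in some adjacency value list (every enqueued node lies here)
def pvAllNbrs (adjacency : List (String × List String)) : List String :=
  adjacency.flatMap Prod.snd

-- parent-pointer chain: r = the strict ancestors of n, youngest first, ending at start
def pvChainB (start : String) (parent : PySem.Dict String String) : String → List String → Prop
  | n, [] => n = start
  | n, p :: ps => n ≠ start ∧ parent.getD n n = p ∧ pvChainB start parent p ps

-- invariant tying an A-queue entry (node, path, depth) at depth d to B's parent dict
def pvItem (start : String) (parent : PySem.Dict String String) (d : Int)
    (it : String × List String × Int) : Prop :=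
  it.2.2 = d ∧ ∃ r, pvChainB start parent it.1 r ∧ it.2.1 = r.reverse ++ [it.1] ∧
    (∀ x ∈ it.2.1, x ∈ parent.keys) ∧ it.2.1.length ≤ parent.size

-- global state invariant: A's seen set IS B's parent key set; keys unique, from start∪neighbours
def pvSt (adjacency : List (String × List String)) (start : String)
    (parent : PySem.Dict String String) (seen : PySem.Set String) : Prop :=
  (∀ x, PySem.Set.contains seen x = parent.contains x) ∧ parent.keys.Nodup ∧
  start ∈ parent.keys ∧ (∀ k ∈ parent.keys, k = start ∨ k ∈ pvAllNbrs adjacency)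

theorem pvFuel_eq (adjacency : List (String × List String)) :
    pvFuel adjacency = (pvAllNbrs adjacency).length + 2 := by
  have h : ∀ (l : List (String × List String)) (a : Nat),
      l.foldl (fun a kv => a + kv.2.length) a = a + (l.flatMap Prod.snd).length := by
    intro l
    induction l with
    | nil => intro a; simp
    | cons kv t ih => intro a; simp [List.foldl_cons, ih, Nat.add_assoc]
  unfold pvFuel pvAllNbrs
  rw [h]
  omega

theorem pvAdjGet_mem (adjacency : List (String × List String)) (k : String) :
    ∀ x ∈ pvAdjGet adjacency k, x ∈ pvAllNbrs adjacency := by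
  unfold pvAdjGet pvAllNbrs
  induction adjacency with
  | nil => simp [PySem.Dict.getD_eq_get?_getD, PySem.Dict.get?]
  | cons p t ih =>
    intro x hx
    rw [show PySem.Dict.mk (p :: t) = { items := p :: t } from rfl] at hx
    rw [PySem.Dict.getD_eq_get?_getD, PySem.Dict.get?_mk_cons] at hx
    by_cases h : (p.1 == k) = true
    · rw [if_pos h] at hx
      simp at hx
      exact List.mem_flatMap.mpr ⟨p, by simp, hx⟩
    · rw [if_neg h] at hx
      rw [← PySem.Dict.getD_eq_get?_getD] at hx
      have := ih x hx
      simp only [List.flatMap_cons, List.mem_append]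
      exact Or.inr this

theorem pvSize_le (parent : PySem.Dict String String) (start : String)
    (L : List String) (hnd : parent.keys.Nodup)
    (hsub : ∀ k ∈ parent.keys, k = start ∨ k ∈ L) :
    parent.size ≤ L.length + 1 := by
  have hs : parent.keys ⊆ start :: L := by
    intro k hk; rcases hsub k hk with h | h
    · simp [h]
    · simp [h]
  have := (hnd.subperm hs).length_le
  simp only [List.length_cons] at this
  have hlen : parent.size = parent.keys.length := by
    simp [PySem.Dict.size, PySem.Dict.keys]
  omega

theorem pvBuild_chain (start : String) (parent : PySem.Dict String String) :
    ∀ (r : List String) (n : String) (acc : List String) (f : Nat),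
      pvChainB start parent n r → r.length < f →
      pvBuild start f parent (n :: acc) = r.reverse ++ n :: acc := by
  intro r
  induction r with
  | nil =>
    intro n acc f h hf
    match f, hf with
    | g + 1, _ =>
      simp only [pvChainB] at h
      simp [pvBuild, h]
  | cons p ps ih =>
    intro n acc f h hf
    match f, hf with
    | g + 1, hf =>
      obtain ⟨hns, hp, hch⟩ := h
      simp only [pvBuild, if_neg hns, hp]
      rw [ih p (n :: acc) g hch (by simpa using Nat.succ_le_succ_iff.mp hf)]
      simp

theorem pvChainB_insert (start : String) (parent : PySem.Dict String String)
    (nb v : String) :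
    ∀ (r : List String) (n : String), pvChainB start parent n r → n ≠ nb →
      (∀ x ∈ r, x ≠ nb) → pvChainB start (parent.insert nb v) n r := by
  intro r
  induction r with
  | nil => intro n h _ _; exact h
  | cons p ps ih =>
    intro n h hn hr
    obtain ⟨hns, hp, hch⟩ := h
    exact ⟨hns, by rw [PySem.Dict.getD_insert_of_ne _ _ _ hn]; exact hp,
      ih p hch (hr p (by simp)) (fun x hx => hr x (by simp [hx]))⟩

theorem pvItem_insert (start : String) (parent : PySem.Dict String String)
    (nb v : String) (hnb : parent.contains nb = false) (d : Int)
    (it : String × List String × Int) (h : pvItem start parent d it) :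
    pvItem start (parent.insert nb v) d it := by
  obtain ⟨hd, r, hch, hpq, hmem, hlen⟩ := h
  have hnbk : nb ∉ parent.keys := fun hk => by
    rw [(PySem.Dict.contains_iff_mem_keys parent nb).mpr hk] at hnb
    exact Bool.true_eq_false.mp hnb
  have hne : ∀ x ∈ it.2.1, x ≠ nb := fun x hx hEq => hnbk (hEq ▸ hmem x hx)
  refine ⟨hd, r, ?_, hpq, ?_, ?_⟩
  · exact pvChainB_insert start parent nb v r it.1 hch (hne it.1 (by simp [hpq]))
      (fun x hx => hne x (by simp [hpq]; exact Or.inl hx))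
  · exact fun x hx => (PySem.Dict.mem_keys_insert parent nb x v).mpr (Or.inr (hmem x hx))
  · rw [PySem.Dict.size_insert]; split <;> omega

theorem pvInner_sim (adjacency : List (String × List String)) (goal start node : String)
    (path : List String) (d : Int) :
    ∀ (nbs : List String) (nxtq : List (String × List String × Int)) (nxtB : List String)
      (qrest : List (String × List String × Int))
      (seen : PySem.Set String) (parent : PySem.Dict String String),
      pvSt adjacency start parent seen →
      pvItem start parent d (node, path, d) →
      (∀ it ∈ qrest, pvItem start parent d it) →
      nxtq.map (·.1) = nxtB → (∀ it ∈ nxtq, pvItem start parent (d + 1) it) →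
      (∀ x ∈ nbs, x ∈ pvAllNbrs adjacency) →
      (match pvNbrs goal start node nbs nxtB parent with
       | .inl res => pvInnerA goal path d nbs (qrest ++ nxtq) seen = .inl res
       | .inr (nxtB', parent') => ∃ nxtq' seen',
           pvInnerA goal path d nbs (qrest ++ nxtq) seen = .inr (qrest ++ nxtq', seen') ∧
           pvSt adjacency start parent' seen' ∧
           (∀ it ∈ qrest, pvItem start parent' d it) ∧
           nxtq'.map (·.1) = nxtB' ∧ (∀ it ∈ nxtq', pvItem start parent' (d + 1) it) ∧
           parent'.size + nxtB.length = parent.size + nxtB'.length) := by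
  intro nbs
  induction nbs with
  | nil =>
    intro nxtq nxtB qrest seen parent hst hitem hrest hmap hnxt _
    exact ⟨nxtq, seen, rfl, hst, hrest, hmap, hnxt, by omega⟩
  | cons nb nbs ih =>
    intro nxtq nxtB qrest seen parent hst hitem hrest hmap hnxt hsub
    obtain ⟨hcont, hnd, hstk, hkeys⟩ := hst
    simp only [pvInnerA, pvNbrs, hcont nb]
    cases hnb : parent.contains nb with
    | true =>
      simp only [if_true]
      exact ih nxtq nxtB qrest seen parent ⟨hcont, hnd, hstk, hkeys⟩ hitem hrest hmap hnxt
        (fun x hx => hsub x (by simp [hx]))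
    | false =>
      simp only [if_neg Bool.false_ne_true]
      have hnbk : nb ∉ parent.keys := fun hk => by
        rw [(PySem.Dict.contains_iff_mem_keys parent nb).mpr hk] at hnb
        exact Bool.true_eq_false.mp hnb
      obtain ⟨_, r, hch, hpq, hmem, hlen⟩ := hitem
      simp only at hch hpq hmem hlen
      have hne : ∀ x ∈ path, x ≠ nb := fun x hx hEq => hnbk (hEq ▸ hmem x hx)
      have hnbs : nb ≠ start := fun hEq => hnbk (hEq ▸ hstk)
      have hch2 : pvChainB start (parent.insert nb node) nb (node :: r) := by
        refine ⟨hnbs, PySem.Dict.getD_insert_self parent nb node nb, ?_⟩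
        exact pvChainB_insert start parent nb node r node hch (hne node (by simp [hpq]))
          (fun x hx => hne x (by simp [hpq]; exact Or.inl hx))
      have hsz : (parent.insert nb node).size = parent.size + 1 := by
        rw [PySem.Dict.size_insert]; simp [hnb]
      by_cases hg : nb = goal
      · simp only [if_pos hg]
        rw [pvBuild_chain start (parent.insert nb node) (node :: r) nb [] _ hch2
          (by have : path.length = r.length + 1 := by simp [hpq]
              simp only [hsz]; simp; omega)]
        simp [hpq]
      · simp only [if_neg hg]
        have hinsSt : pvSt adjacency start (parent.insert nb node) (PySem.Set.add seen nb) := by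
          refine ⟨?_, PySem.Dict.nodup_keys_insert parent nb node hnd,
            (PySem.Dict.mem_keys_insert parent nb start node).mpr (Or.inr hstk), ?_⟩
          · intro x
            have hscont : PySem.Set.contains seen nb = false := by rw [hcont nb, hnb]
            have hx := hcont x
            simp only [PySem.Set.contains] at hscont hx ⊢
            simp only [PySem.Set.add, PySem.Set.contains]
            rw [if_neg (by simpa using hscont)]
            rw [PySem.Dict.contains_insert]
            have hx2 : decide (x ∈ seen) = parent.contains x := by simpa using hx
            simp [List.mem_append, or_comm, ← beq_iff_eq, hx2]
          · intro k hk
            rcases (PySem.Dict.mem_keys_insert parent nb k node).mp hk with rfl | hk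
            · exact Or.inr (hsub k (by simp))
            · exact hkeys k hk
        have := ih (nxtq ++ [(nb, path ++ [nb], d + 1)]) (nxtB ++ [nb]) qrest
          (PySem.Set.add seen nb) (parent.insert nb node) hinsSt
          (pvItem_insert start parent nb node hnb d (node, path, d)
            ⟨rfl, r, hch, hpq, hmem, hlen⟩)
          (fun it hit => pvItem_insert start parent nb node hnb d it (hrest it hit))
          (by simp [hmap])
          (fun it hit => by
            rcases List.mem_append.mp hit with hold | hnew
            · exact pvItem_insert start parent nb node hnb (d + 1) it (hnxt it hold)
            · rcases List.mem_singleton.mp hnew with rfl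
              refine ⟨rfl, node :: r, hch2, by simp [hpq], ?_, ?_⟩
              · intro x hx
                rcases List.mem_append.mp hx with hx | hx
                · exact (PySem.Dict.mem_keys_insert parent nb x node).mpr (Or.inr (hmem x hx))
                · exact (PySem.Dict.mem_keys_insert parent nb x node).mpr
                    (Or.inl (List.mem_singleton.mp hx))
              · have : path.length = r.length + 1 := by simp [hpq]
                simp only [hsz]; simp; omega)
          (fun x hx => hsub x (by simp [hx]))
        rw [← List.append_assoc] at this
        cases hB : pvNbrs goal start node nbs (nxtB ++ [nb]) (parent.insert nb node) with
        | inl res => rw [hB] at this; exact this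
        | inr pr =>
          obtain ⟨nxtB', parent'⟩ := pr
          rw [hB] at this
          obtain ⟨nxtq', seen', hA, hst', hrest', hmap', hnxt', hszeq⟩ := this
          refine ⟨nxtq', seen', hA, hst', hrest', hmap', hnxt', ?_⟩
          simp only [List.length_append, List.length_singleton] at hszeq
          omega

theorem pvLevel_sim (adjacency : List (String × List String)) (goal start : String)
    (md : Int) (d : Int) (hd : d < md) :
    ∀ (cur : List String) (qcur nxtq : List (String × List String × Int)) (nxtB : List String)
      (seen : PySem.Set String) (parent : PySem.Dict String String) (fA : Nat),
      pvSt adjacency start parent seen →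
      qcur.map (·.1) = cur → (∀ it ∈ qcur, pvItem start parent d it) →
      nxtq.map (·.1) = nxtB → (∀ it ∈ nxtq, pvItem start parent (d + 1) it) →
      (match pvLevel adjacency goal start cur nxtB parent with
       | .inl res => pvLoopA adjacency goal md (fA + qcur.length) (qcur ++ nxtq) seen = res
       | .inr (nxtB', parent') => ∃ nxtq' seen',
           pvLoopA adjacency goal md (fA + qcur.length) (qcur ++ nxtq) seen =
             pvLoopA adjacency goal md fA nxtq' seen' ∧
           pvSt adjacency start parent' seen' ∧
           nxtq'.map (·.1) = nxtB' ∧ (∀ it ∈ nxtq', pvItem start parent' (d + 1) it) ∧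
           parent'.size + nxtB.length = parent.size + nxtB'.length) := by
  intro cur
  induction cur with
  | nil =>
    intro qcur nxtq nxtB seen parent fA hst hmapc hqc hmapn hqn
    rcases List.map_eq_nil_iff.mp hmapc with rfl
    exact ⟨nxtq, seen, by simp, hst, hmapn, hqn, by omega⟩
  | cons node rest ih =>
    intro qcur nxtq nxtB seen parent fA hst hmapc hqc hmapn hqn
    cases qcur with
    | nil => simp at hmapc
    | cons hd0 qrest =>
      obtain ⟨n0, path0, d0⟩ := hd0
      simp only [List.map_cons, List.cons.injEq] at hmapc
      obtain ⟨rfl, hmaprest⟩ := hmapc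
      have hd0d : d = d0 := ((hqc (n0, path0, d0) List.mem_cons_self).1).symm
      subst hd0d
      have hfuel : fA + (qrest.length + 1) = (fA + qrest.length) + 1 := by omega
      simp only [List.length_cons, hfuel, List.cons_append, pvLoopA, if_neg (not_le.mpr hd)]
      simp only [pvLevel]
      have hinner := pvInner_sim adjacency goal start n0 path0 d (pvAdjGet adjacency n0)
        nxtq nxtB qrest seen parent hst (hqc (n0, path0, d) List.mem_cons_self)
        (fun it hit => hqc it (List.mem_cons_of_mem _ hit)) hmapn hqn
        (pvAdjGet_mem adjacency n0)
      cases hB : pvNbrs goal start n0 (pvAdjGet adjacency n0) nxtB parent with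
      | inl res =>
        rw [hB] at hinner
        simp only [hinner]
      | inr pr =>
        obtain ⟨nxtB2, parent2⟩ := pr
        rw [hB] at hinner
        obtain ⟨nxtq2, seen2, hA, hst2, hrest2, hmap2, hnxt2, hsz2⟩ := hinner
        simp only [hA]
        have := ih qrest nxtq2 nxtB2 seen2 parent2 fA hst2 hmaprest hrest2 hmap2 hnxt2
        cases hL : pvLevel adjacency goal start rest nxtB2 parent2 with
        | inl res =>
          simp only [hL] at this ⊢
          exact this
        | inr pr2 =>
          obtain ⟨nxtB3, parent3⟩ := pr2
          simp only [hL] at this ⊢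
          obtain ⟨nxtq3, seen3, hA3, hst3, hmap3, hnxt3, hsz3⟩ := this
          exact ⟨nxtq3, seen3, hA3, hst3, hmap3, hnxt3, by omega⟩

theorem pvSkip (adjacency : List (String × List String)) (goal : String) (md : Int) :
    ∀ (q : List (String × List String × Int)) (seen : PySem.Set String) (fA : Nat),
      (∀ it ∈ q, md ≤ it.2.2) → q.length ≤ fA →
      pvLoopA adjacency goal md fA q seen = [] := by
  intro q
  induction q with
  | nil => intro seen fA _ _; cases fA <;> rfl
  | cons hd0 t ih =>
    intro seen fA hdep hlen
    obtain ⟨n0, path0, d0⟩ := hd0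
    match fA, hlen with
    | f + 1, hlen =>
      simp only [pvLoopA, if_pos (hdep (n0, path0, d0) List.mem_cons_self)]
      exact ih seen f (fun it hit => hdep it (List.mem_cons_of_mem _ hit)) (by simpa using hlen)

theorem pvLevels_sim (adjacency : List (String × List String)) (goal start : String)
    (md : Int) :
    ∀ (fB : Nat) (d : Int) (frontier : List String) (qf : List (String × List String × Int))
      (parent : PySem.Dict String String) (seen : PySem.Set String) (fA : Nat),
      pvSt adjacency start parent seen →
      qf.map (·.1) = frontier → (∀ it ∈ qf, pvItem start parent d it) →
      (md - d).toNat = fB →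
      (qf.length : Int) + (pvAllNbrs adjacency).length + 1 - parent.size ≤ (fA : Int) →
      pvLoopA adjacency goal md fA qf seen = pvLevels adjacency goal start fB frontier parent := by
  intro fB
  induction fB with
  | zero =>
    intro d frontier qf parent seen fA hst hmap hitems htn hfa
    have hmd : md ≤ d := by omega
    have hsize := pvSize_le parent start (pvAllNbrs adjacency) hst.2.1 hst.2.2.2
    rw [pvSkip adjacency goal md qf seen fA
      (fun it hit => le_of_le_of_eq hmd (hitems it hit).1.symm) (by omega)]
    rfl
  | succ fB ih =>
    intro d frontier qf parent seen fA hst hmap hitems htn hfa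
    have hd : d < md := by omega
    cases frontier with
    | nil =>
      rcases List.map_eq_nil_iff.mp hmap with rfl
      cases fA <;> rfl
    | cons node rest =>
      have hsize := pvSize_le parent start (pvAllNbrs adjacency) hst.2.1 hst.2.2.2
      have hqlen : qf.length ≤ fA := by omega
      have hfa' : fA = (fA - qf.length) + qf.length := by omega
      simp only [pvLevels]
      have hlev := pvLevel_sim adjacency goal start md d hd (node :: rest) qf [] [] seen parent
        (fA - qf.length) hst hmap hitems rfl (by simp)
      cases hL : pvLevel adjacency goal start (node :: rest) [] parent with
      | inl res =>
        rw [hL] at hlev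
        rw [hfa']
        simpa using hlev
      | inr pr =>
        obtain ⟨nxtB', parent'⟩ := pr
        rw [hL] at hlev
        obtain ⟨nxtq', seen', hA, hst', hmap', hnxt', hsz⟩ := hlev
        simp only [List.append_nil] at hA
        rw [hfa', hA]
        refine ih (d + 1) nxtB' nxtq' parent' seen' (fA - qf.length) hst' hmap' hnxt'
          (by omega) ?_
        have hlen' : nxtq'.length = nxtB'.length := by rw [← hmap', List.length_map]
        simp only [List.length_nil] at hsz
        have : ((fA - qf.length : Nat) : Int) = (fA : Int) - qf.length := by omega
        omega

-- ===== VERDICT (by name: the statement is the Claim_ definition above) =====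
theorem shortest_path_between_spec : Claim_equal_shortest_path_between := by
  intro adjacency start_id goal_id max_depth _
  unfold Spec_shortest_path_between shortest_path_between shortest_path_between_alt
  split
  · rfl
  · split
    · rfl
    · refine pvLevels_sim adjacency goal_id start_id max_depth max_depth.toNat 0 [start_id]
        [(start_id, [start_id], (0 : Int))] ((PySem.Dict.empty).insert start_id start_id)
        (PySem.Set.ofList [start_id]) (pvFuel adjacency) ⟨?_, ?_, ?_, ?_⟩ rfl ?_ (by omega) ?_
      · intro x
        simp [PySem.Set.ofList, PySem.Set.add, PySem.Set.contains, PySem.Dict.contains_insert,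
          PySem.Set.empty, ← beq_iff_eq]
      · exact PySem.Dict.nodup_keys_insert _ _ _ PySem.Dict.nodup_keys_empty
      · exact (PySem.Dict.mem_keys_insert _ _ _ _).mpr (Or.inl rfl)
      · intro k hk
        rcases (PySem.Dict.mem_keys_insert _ _ _ _).mp hk with rfl | hk
        · exact Or.inl rfl
        · rw [PySem.Dict.keys_empty] at hk; simp at hk
      · intro it hit
        rcases List.mem_singleton.mp hit with rfl
        refine ⟨rfl, [], rfl, rfl, ?_, ?_⟩
        · intro x hx
          exact (PySem.Dict.mem_keys_insert _ _ _ _).mpr (Or.inl (List.mem_singleton.mp hx))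
        · rw [PySem.Dict.size_insert, PySem.Dict.contains_empty]
          simp [PySem.Dict.size, PySem.Dict.empty]
      · rw [pvFuel_eq]
        have hsz : ((PySem.Dict.empty.insert start_id start_id).size : Int) = 1 := by
          rw [PySem.Dict.size_insert, PySem.Dict.contains_empty]
          simp [PySem.Dict.size, PySem.Dict.empty]
        simp only [List.length_singleton, hsz]
        push_cast
        omega
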